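-- pv_equiv track=rewrite | github.com/raymogg/GeneticAlgorithmIDSAttacks | AlgotithmTesting.py | extractPlotLabels
-- ===== SOURCE A (Python) =====
-- def extractPlotLabels(rawLabels):
--     plot_labels = []
--     for i in range(len(rawLabels)):
--         if (i == 1 or i == 2 or i == 3 or i == 41 or i == 42):
--             continue
--         else:
--             plot_labels.append(rawLabels[i])
--
--     return plot_labels
-- ===== SOURCE B (Python) =====
-- def extractPlotLabels(rawLabels):
--     # B: concatenate the three surviving contiguous slices instead of index-looping.
--     return list(rawLabels[0:1]) + list(rawLabels[4:41]) + list(rawLabels[43:])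
-- ===== Notes on version B (the rewrite author's own statement) =====
-- stated objective: simpler
-- what changed: Replaces the index loop over range(len) that skips the fixed indices {1,2,3,41,42} with a direct concatenation of the three surviving contiguous slices rawLabels[0:1] + rawLabels[4:41] + rawLabels[43:].
import Mathlib
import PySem

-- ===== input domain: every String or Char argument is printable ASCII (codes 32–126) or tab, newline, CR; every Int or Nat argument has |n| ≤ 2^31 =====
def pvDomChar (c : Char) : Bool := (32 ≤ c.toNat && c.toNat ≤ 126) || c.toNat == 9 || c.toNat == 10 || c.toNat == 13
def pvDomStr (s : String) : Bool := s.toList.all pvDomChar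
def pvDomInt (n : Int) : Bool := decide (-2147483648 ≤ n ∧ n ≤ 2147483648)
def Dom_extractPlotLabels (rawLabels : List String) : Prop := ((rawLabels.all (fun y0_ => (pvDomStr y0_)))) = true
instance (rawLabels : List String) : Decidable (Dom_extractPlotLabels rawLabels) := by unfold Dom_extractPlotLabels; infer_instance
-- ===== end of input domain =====

-- B replaces A's index loop over range(len) (skipping the fixed indices {1,2,3,41,42}) by the
-- concatenation of the three surviving contiguous slices; objective: simpler.

-- ===== PORT A =====
-- literal port of A: for i in range(len(rawLabels)): skip i ∈ {1,2,3,41,42}, else append rawLabels[i]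
def extractPlotLabels (rawLabels : List String) : List String :=
  (PySem.List.pyRange 0 (PySem.List.len rawLabels) 1).foldl
    (fun plot_labels i =>
      if i == 1 || i == 2 || i == 3 || i == 41 || i == 42 then plot_labels
      else plot_labels ++ [PySem.List.pyGetD rawLabels i ""]) []

-- ===== PORT B =====
-- literal port of B: rawLabels[0:1] + rawLabels[4:41] + rawLabels[43:]
def extractPlotLabels_alt (rawLabels : List String) : List String :=
  PySem.List.slice rawLabels (some 0) (some 1)
    ++ PySem.List.slice rawLabels (some 4) (some 41)
    ++ PySem.List.slice rawLabels (some 43) none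

-- ===== PRECONDITION & SPEC =====
def Spec_extractPlotLabels (rawLabels : List String) (out : List String) : Prop := out = extractPlotLabels_alt rawLabels
instance (rawLabels : List String) (out : List String) : Decidable (Spec_extractPlotLabels rawLabels out) := by unfold Spec_extractPlotLabels; infer_instance

-- ===== CLAIM (what is proved, stated in full; the proofs are below) =====
def Claim_equal_extractPlotLabels : Prop := ∀ (rawLabels : List String), Dom_extractPlotLabels rawLabels → Spec_extractPlotLabels rawLabels (extractPlotLabels rawLabels)

-- ===== LEMMAS AND PROOFS =====

-- a fold that skips every element of l leaves the accumulator unchanged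
theorem pv_foldl_skip {α β : Type} (c : β → Bool) (g : α → β → α) (l : List β) (acc : α)
    (h : ∀ x ∈ l, c x = true) :
    l.foldl (fun a x => if c x then a else g a x) acc = acc := by
  induction l generalizing acc with
  | nil => rfl
  | cons y t ih =>
    simp only [List.foldl_cons, h y (by simp)]
    exact ih acc (fun x hx => h x (by simp [hx]))

-- a fold that keeps every element of l appends their images
theorem pv_foldl_keep {α β : Type} (c : β → Bool) (f : β → α) (l : List β) (acc : List α)
    (h : ∀ x ∈ l, c x = false) :
    l.foldl (fun a x => if c x then a else a ++ [f x]) acc = acc ++ l.map f := by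
  induction l generalizing acc with
  | nil => simp
  | cons y t ih =>
    simp only [List.foldl_cons, h y (by simp), Bool.false_eq_true, if_false, List.map_cons]
    rw [ih (acc ++ [f y]) (fun x hx => h x (by simp [hx]))]
    simp

-- the indexed map of a kept range is the corresponding contiguous slice
theorem pv_map_range_getD (xs : List String) (a b : Nat) (hab : a ≤ b) (hb : b ≤ xs.length) :
    (PySem.List.pyRange (a : Int) (b : Int) 1).map (fun j => PySem.List.pyGetD xs j "") =
      (xs.drop a).take (b - a) := by
  rw [PySem.List.pyRange_one]
  simp only [List.map_map]
  apply List.ext_getElem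
  · simp; omega
  · intro i h1 h2
    simp only [List.getElem_map, List.getElem_range, Function.comp]
    have hi : i < b - a := by simpa using h1
    rw [show ((a:Int) + (i:Int)) = ((a + i : Nat) : Int) by push_cast; ring,
      PySem.List.pyGetD_natCast]
    have : a + i < xs.length := by omega
    simp [List.getElem?_eq_getElem this]

theorem extractPlotLabels_eq (xs : List String) :
    extractPlotLabels xs = extractPlotLabels_alt xs := by
  classical
  set n := xs.length with hn
  have hlen : PySem.List.len xs = (n : Int) := by simp [PySem.List.len_eq, hn]
  -- split range(0, n) at the clamped boundaries
  have hsplit : PySem.List.pyRange 0 (n : Int) 1 =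
      PySem.List.pyRange ((0:Nat) : Int) ((min 1 n : Nat) : Int) 1
        ++ PySem.List.pyRange ((min 1 n : Nat) : Int) ((min 4 n : Nat) : Int) 1
        ++ PySem.List.pyRange ((min 4 n : Nat) : Int) ((min 41 n : Nat) : Int) 1
        ++ PySem.List.pyRange ((min 41 n : Nat) : Int) ((min 43 n : Nat) : Int) 1
        ++ PySem.List.pyRange ((min 43 n : Nat) : Int) ((n : Nat) : Int) 1 := by
    rw [← PySem.List.pyRange_one_append _ _ _ (by push_cast; omega) (by push_cast; omega),
        ← PySem.List.pyRange_one_append _ _ _ (by push_cast; omega) (by push_cast; omega),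
        ← PySem.List.pyRange_one_append _ _ _ (by push_cast; omega) (by push_cast; omega),
        ← PySem.List.pyRange_one_append _ _ _ (by push_cast; omega) (by push_cast; omega)]
    norm_num
  unfold extractPlotLabels
  rw [hlen, hsplit]
  simp only [List.foldl_append]
  -- segment [0, min 1 n): kept (i = 0)
  rw [pv_foldl_keep _ _ _ _ (by
    intro x hx
    have := (PySem.List.mem_pyRange_one).mp hx
    simp only [Bool.or_eq_false_iff, beq_eq_false_iff_ne, ne_eq]
    push_cast at this
    omega)]
  -- segment [min 1 n, min 4 n): skipped (i ∈ {1,2,3})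
  rw [pv_foldl_skip _ _ _ _ (by
    intro x hx
    have := (PySem.List.mem_pyRange_one).mp hx
    simp only [Bool.or_eq_true, beq_iff_eq]
    push_cast at this
    omega)]
  -- segment [min 4 n, min 41 n): kept
  rw [pv_foldl_keep _ _ _ _ (by
    intro x hx
    have := (PySem.List.mem_pyRange_one).mp hx
    simp only [Bool.or_eq_false_iff, beq_eq_false_iff_ne, ne_eq]
    push_cast at this
    omega)]
  -- segment [min 41 n, min 43 n): skipped (i ∈ {41,42})
  rw [pv_foldl_skip _ _ _ _ (by
    intro x hx
    have := (PySem.List.mem_pyRange_one).mp hx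
    simp only [Bool.or_eq_true, beq_iff_eq]
    push_cast at this
    omega)]
  -- segment [min 43 n, n): kept
  rw [pv_foldl_keep _ _ _ _ (by
    intro x hx
    have := (PySem.List.mem_pyRange_one).mp hx
    simp only [Bool.or_eq_false_iff, beq_eq_false_iff_ne, ne_eq]
    push_cast at this
    omega)]
  rw [pv_map_range_getD xs 0 (min 1 n) (by omega) (by omega),
      pv_map_range_getD xs (min 4 n) (min 41 n) (by omega) (by omega),
      pv_map_range_getD xs (min 43 n) n (by omega) (by omega)]
  -- B's slices
  unfold extractPlotLabels_alt
  rw [PySem.List.slice_toNat xs (a := 0) (b := 1) (by norm_num) (by norm_num),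
      PySem.List.slice_toNat xs (a := 4) (b := 41) (by norm_num) (by norm_num),
      PySem.List.slice_from xs (a := 43) (by norm_num)]
  have hn : xs.length = n := rfl
  have e1 : List.take (min 1 n - 0) (List.drop 0 xs) = List.take 1 xs := by
    by_cases h : 1 ≤ n
    · rw [show min 1 n - 0 = 1 by omega, List.drop_zero]
    · have hx : xs = [] := List.length_eq_zero_iff.mp (by omega)
      subst hx; simp
  have e2 : List.take (min 41 n - min 4 n) (List.drop (min 4 n) xs) =
      List.take 37 (List.drop 4 xs) := by
    by_cases h4 : n ≤ 4
    · rw [show min 41 n - min 4 n = 0 by omega,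
          List.drop_eq_nil_of_le (show xs.length ≤ 4 by omega)]
      simp
    · rw [show min 4 n = 4 by omega]
      by_cases h41 : n ≤ 41
      · rw [show min 41 n = n by omega,
            List.take_of_length_le (by rw [List.length_drop, hn]; try omega),
            List.take_of_length_le (by rw [List.length_drop, hn]; try omega)]
      · rw [show min 41 n = 41 by omega]
  have e3 : List.take (n - min 43 n) (List.drop (min 43 n) xs) = List.drop 43 xs := by
    by_cases h43 : n ≤ 43
    · rw [show n - min 43 n = 0 by omega,
          List.drop_eq_nil_of_le (show xs.length ≤ 43 by omega)]
      simp
    · rw [show min 43 n = 43 by omega,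
          List.take_of_length_le (by rw [List.length_drop, hn]; try omega)]
  rw [e1, e2, e3]
  simp

-- ===== VERDICT (by name: the statement is the Claim_ definition above) =====
theorem extractPlotLabels_spec : Claim_equal_extractPlotLabels := by
  intro xs _
  exact extractPlotLabels_eq xs
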